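-- pv_equiv track=rewrite | github.com/sesh/bm2 | links/importers/feedbin.py | short_text
-- ===== SOURCE A (Python) =====
-- def short_text(text):
--     parts = text.split(".")
--
--     result = ""
--
--     for p in parts:
--         result += p + "."
--         if len(result) > 80:
--             return result
--
--     return result
-- ===== SOURCE B (Python) =====
-- def short_text(text):
--     start = 0
--     while True:
--         idx = text.find(".", start)
--         if idx == -1:
--             return text + "."
--         candidate = text[:idx] + "."
--         if len(candidate) > 80:
--             return candidate
--         start = idx + 1
-- ===== Notes on version B (the rewrite author's own statement) =====
-- stated objective: alternative
-- what changed: Replaces the split-on-separator list iteration with string accumulation by a single find-scan over the raw string that keeps only a start index and reconstructs the answer by slicing.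
import Mathlib
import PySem

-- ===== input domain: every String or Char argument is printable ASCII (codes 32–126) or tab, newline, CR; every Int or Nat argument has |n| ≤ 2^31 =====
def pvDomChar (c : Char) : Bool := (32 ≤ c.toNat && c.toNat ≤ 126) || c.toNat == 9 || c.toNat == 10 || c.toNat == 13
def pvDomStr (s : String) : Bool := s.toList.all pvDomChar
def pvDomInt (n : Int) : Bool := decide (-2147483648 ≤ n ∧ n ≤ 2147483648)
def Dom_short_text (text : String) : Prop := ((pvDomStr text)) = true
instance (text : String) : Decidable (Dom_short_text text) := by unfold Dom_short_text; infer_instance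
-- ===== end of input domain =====

-- B replaces A's split-and-accumulate loop with a single find-scan keeping only a start index (alternative decomposition, same cost).

-- ===== PORT A =====
-- the 'for p in parts' loop: result accumulates p + "." and returns early once len(result) > 80
def shortTextLoop : List (List Char) → List Char → List Char
  | [], result => result
  | p :: rest, result =>
    let result' := result ++ p ++ ['.']
    if 80 < result'.length then result' else shortTextLoop rest result'

def short_text (text : String) : String :=
  String.ofList (shortTextLoop (PySem.Chars.splitOn text.toList ['.']) [])

-- ===== PORT B =====
-- the 'while True' scan of Source B; fuel = length+1 is a totality guard only
-- (start strictly increases and stays ≤ length+1, so the fuel-0 branch is never reached)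
def shortTextScan (s : List Char) : Nat → Nat → List Char
  | _, 0 => s ++ ['.']
  | start, fuel + 1 =>
    let idx := PySem.Chars.findFrom s ['.'] (start : Int) none
    if idx = -1 then s ++ ['.']
    else
      let candidate := PySem.Chars.slice s none (some idx) ++ ['.']
      if 80 < candidate.length then candidate
      else shortTextScan s (idx.toNat + 1) fuel

def short_text_alt (text : String) : String :=
  String.ofList (shortTextScan text.toList 0 (text.toList.length + 1))

-- ===== PRECONDITION & SPEC =====
def Spec_short_text (text : String) (out : String) : Prop := out = short_text_alt text
instance (text : String) (out : String) : Decidable (Spec_short_text text out) := by unfold Spec_short_text; infer_instance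

-- ===== CLAIM (what is proved, stated in full; the proofs are below) =====
def Claim_equal_short_text : Prop := ∀ (text : String), Dom_short_text text → Spec_short_text text (short_text text)

-- ===== LEMMAS AND PROOFS =====

-- pure structural form of text.split('.')
def split1 : List Char → List (List Char)
  | [] => [[]]
  | c :: s => if c = '.' then [] :: split1 s else (split1 s).modifyHead (c :: ·)

-- common reference recursion: the truncation result, one character at a time
def G (acc : List Char) : List Char → List Char
  | [] => acc ++ ['.']
  | c :: s =>
    if c = '.' then (if 80 < acc.length + 1 then acc ++ ['.'] else G (acc ++ ['.']) s)
    else G (acc ++ [c]) s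

theorem split1_ne_nil (s : List Char) : split1 s ≠ [] := by
  induction s with
  | nil => simp [split1]
  | cons c s ih =>
    simp only [split1]
    split_ifs
    · simp
    · cases h : split1 s with
      | nil => exact absurd h ih
      | cons p ps => simp [List.modifyHead]

theorem split1_cons_exists (s : List Char) : ∃ p ps, split1 s = p :: ps := by
  cases h : split1 s with
  | nil => exact absurd h (split1_ne_nil s)
  | cons p ps => exact ⟨p, ps, rfl⟩

theorem splitOn_go_eq (fuel : Nat) : ∀ (l cur : List Char) (acc : List (List Char)),
    l.length < fuel →
    PySem.Chars.splitOn.go ['.'] fuel l cur acc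
      = acc.reverse ++ (split1 l).modifyHead (cur.reverse ++ ·) := by
  induction fuel with
  | zero => intro l cur acc h; omega
  | succ f ih =>
    intro l cur acc h
    cases l with
    | nil => simp [PySem.Chars.splitOn.go, split1, List.modifyHead]
    | cons c rest =>
      by_cases hc : c = '.'
      · subst hc
        have hrest : rest.length < f := by simpa using Nat.lt_of_succ_lt_succ h
        rw [show PySem.Chars.splitOn.go ['.'] (f + 1) ('.' :: rest) cur acc
              = PySem.Chars.splitOn.go ['.'] f (List.drop 1 ('.' :: rest)) [] (cur.reverse :: acc) by
            simp [PySem.Chars.splitOn.go, List.isPrefixOf]]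
        rw [ih _ _ _ (by simpa using hrest)]
        obtain ⟨p, ps, hps⟩ := split1_cons_exists rest
        simp [split1, hps, List.modifyHead]
      · have hrest : rest.length < f := by simpa using Nat.lt_of_succ_lt_succ h
        rw [show PySem.Chars.splitOn.go ['.'] (f + 1) (c :: rest) cur acc
              = PySem.Chars.splitOn.go ['.'] f rest (c :: cur) acc by
            simp only [PySem.Chars.splitOn.go, List.isPrefixOf]
            simp
            exact fun h => absurd h.symm hc]
        rw [ih _ _ _ hrest]
        obtain ⟨p, ps, hps⟩ := split1_cons_exists rest
        simp [split1, hc, hps, List.modifyHead]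

theorem splitOn_eq_split1 (s : List Char) : PySem.Chars.splitOn s ['.'] = split1 s := by
  have h := splitOn_go_eq (s.length + 1) s [] [] (by omega)
  obtain ⟨p, ps, hps⟩ := split1_cons_exists s
  simpa [PySem.Chars.splitOn, hps, List.modifyHead] using h

theorem loop_eq_G (s : List Char) : ∀ acc, shortTextLoop (split1 s) acc = G acc s := by
  induction s with
  | nil => intro acc; simp [split1, shortTextLoop, G]
  | cons c s ih =>
    intro acc
    by_cases hc : c = '.'
    · subst hc
      by_cases h80 : 80 < acc.length + 1 <;>
        simp [split1, shortTextLoop, G, h80, ih]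
    · obtain ⟨p, ps, hps⟩ := split1_cons_exists s
      simp only [split1, if_neg hc, G, hps, List.modifyHead]
      rw [← ih (acc ++ [c]), hps]
      simp only [shortTextLoop, List.append_assoc, List.cons_append, List.nil_append]

theorem G_no_dot (t : List Char) : ∀ acc, ¬ ['.'] <:+: t → G acc t = acc ++ t ++ ['.'] := by
  induction t with
  | nil => intro acc _; simp [G]
  | cons c t ih =>
    intro acc hni
    have hc : c ≠ '.' := by
      intro h; subst h
      exact hni (List.IsPrefix.isInfix ⟨t, rfl⟩)
    have hni' : ¬ ['.'] <:+: t := fun h => hni (List.infix_cons h)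
    simp only [G, if_neg hc]
    rw [ih _ hni']
    simp

theorem G_dot_at (r : Nat) : ∀ (t acc : List Char),
    (∀ c ∈ t.take r, c ≠ '.') → t[r]? = some '.' →
    G acc t = if 80 < acc.length + r + 1 then acc ++ t.take r ++ ['.']
              else G (acc ++ t.take r ++ ['.']) (t.drop (r + 1)) := by
  induction r with
  | zero =>
    intro t acc _ hget
    cases t with
    | nil => simp at hget
    | cons c t' =>
      simp only [List.getElem?_cons_zero, Option.some.injEq] at hget
      subst hget
      simp [G]
  | succ r ih =>
    intro t acc htake hget
    cases t with
    | nil => simp at hget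
    | cons c t' =>
      have hc : c ≠ '.' := htake c (by simp [List.take_succ_cons])
      have htake' : ∀ x ∈ t'.take r, x ≠ '.' := by
        intro x hx; exact htake x (by simp [List.take_succ_cons, hx])
      have hget' : t'[r]? = some '.' := by simpa using hget
      simp only [G, if_neg hc]
      rw [ih t' (acc ++ [c]) htake' hget']
      simp only [List.length_append, List.length_singleton, List.take_succ_cons,
        List.drop_succ_cons, List.append_assoc, List.cons_append, List.nil_append]
      split_ifs with h1 h2 h3
      · rfl
      · omega
      · omega
      · rfl

theorem scan_eq_G (fuel : Nat) : ∀ (s : List Char) (start : Nat),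
    start ≤ s.length → s.length - start < fuel →
    shortTextScan s start fuel = G (s.take start) (s.drop start) := by
  induction fuel with
  | zero => intro s start h1 h2; omega
  | succ f ih =>
    intro s start h1 h2
    have hfind := PySem.Chars.findFrom_natCast s ['.'] start h1
    by_cases hd : PySem.Chars.find (s.drop start) ['.'] = -1
    · have hni : ¬ ['.'] <:+: s.drop start := (PySem.Chars.find_eq_neg_one_iff _ _).mp hd
      rw [shortTextScan, G_no_dot _ _ hni]
      simp [hfind, hd, - List.append_assoc, List.take_append_drop]
    · set d := PySem.Chars.find (s.drop start) ['.'] with hdd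
      have hd0 : 0 ≤ d := by
        have := PySem.Chars.neg_one_le_find (s.drop start) ['.']
        omega
      obtain ⟨hpre, hmin⟩ := PySem.Chars.find_spec hd0
      have hdl : d.toNat < (s.drop start).length := by
        by_contra hle
        have : (s.drop start).drop d.toNat = [] := List.drop_eq_nil_iff.mpr (by omega)
        rw [this] at hpre
        simpa using hpre.length_le
      have hsl : (s.drop start).length = s.length - start := by simp
      have hget : (s.drop start)[d.toNat]? = some '.' := by
        obtain ⟨u, hu⟩ := hpre
        have h0 : ((s.drop start).drop d.toNat)[0]? = some '.' := by rw [← hu]; rfl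
        rw [List.getElem?_drop] at h0
        simpa using h0
      have hgets : s[start + d.toNat]? = some '.' := by
        rw [← List.getElem?_drop]; exact hget
      have htake : ∀ c ∈ (s.drop start).take d.toNat, c ≠ '.' := by
        intro c hc hcd; subst hcd
        obtain ⟨i, hi, hieq⟩ := List.mem_iff_getElem.mp hc
        have hir : i < d.toNat := by
          have := hi; simp [List.length_take] at this; omega
        have hdropi : (s.drop start).drop i = '.' :: (s.drop start).drop (i + 1) := by
          rw [List.drop_eq_getElem_cons (by omega)]
          congr 1
          rw [← hieq, List.getElem_take]
        exact hmin i hir ⟨(s.drop start).drop (i + 1), by rw [hdropi]; rfl⟩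
      rw [shortTextScan]
      have hidx : PySem.Chars.findFrom s ['.'] (start : Int) none = (start : Int) + d := by
        rw [hfind, if_neg hd]
      simp only [hidx]
      have hne : (start : Int) + d ≠ -1 := by omega
      rw [if_neg hne]
      have htn : ((start : Int) + d).toNat = start + d.toNat := by omega
      have hslice : PySem.Chars.slice s none (some ((start : Int) + d)) = s.take (start + d.toNat) := by
        rw [PySem.Chars.slice_eq_listSlice, PySem.List.slice_to (hb := by omega), htn]
      simp only [hslice]
      have hlen1 : (s.take (start + d.toNat) ++ ['.']).length = start + d.toNat + 1 := by
        simp [List.length_take]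
        omega
      have htakeadd : s.take (start + d.toNat) = s.take start ++ (s.drop start).take d.toNat :=
        List.take_add
      rw [G_dot_at d.toNat (s.drop start) (s.take start) htake hget]
      have hlt : (s.take start).length = start := by simp [List.length_take]; omega
      rw [hlen1, hlt]
      split_ifs with h80
      · rw [htakeadd, List.append_assoc]
      · rw [htn, ih s (start + d.toNat + 1) (by omega) (by omega)]
        congr 1
        · rw [List.take_add_one, htakeadd, hgets, List.append_assoc]
          simp
        · rw [List.drop_drop]
          congr 1

-- ===== VERDICT (by name: the statement is the Claim_ definition above) =====
theorem short_text_spec : Claim_equal_short_text := by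
  intro text _
  show short_text text = short_text_alt text
  unfold short_text short_text_alt
  rw [splitOn_eq_split1, loop_eq_G, scan_eq_G (text.toList.length + 1) text.toList 0 (by omega) (by omega)]
  simp
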